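-- pv_equiv track=rewrite | github.com/erturkmemmedli/Hacker-Rank-Solutions | Algorithms/Dynamic Programming/countArray.py | countArray_alternative
-- ===== SOURCE A (Python) =====
-- def countArray_alternative(n, k, x):
--     # Return the number of ways to fill in the array.
--     mod = 1_000_000_007
--
--     dp = [[None for _ in range(n)] for _ in range(2)]
--
--     dp[0][0] = 1 if x == 1 else 0
--     dp[1][0] = 0 if x == 1 else 1
--
--     for i in range(1, n):
--         dp[0][i] = dp[1][i - 1] % mod
--         dp[1][i] = (dp[0][i - 1] * (k - 1) + dp[1][i - 1] * (k - 2)) % mod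
--
--     return dp[0][n - 1]
-- ===== SOURCE B (Python) =====
-- def countArray_alternative(n, k, x):
--     # Closed-form via fast 2x2 matrix exponentiation: answer = (v0 * M^(n-1))[0]
--     # where M = [[0, k-1], [1, k-2]] mod p and v0 = e_x-row.  O(log n) instead of O(n).
--     mod = 1_000_000_007
--
--     def mat_mul(A, B):
--         (a, b), (c, d) = A
--         (e, f), (g, h) = B
--         return (((a * e + b * g) % mod, (a * f + b * h) % mod),
--                 ((c * e + d * g) % mod, (c * f + d * h) % mod))
--
--     M = ((0, (k - 1) % mod), (1, (k - 2) % mod))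
--     R = ((1, 0), (0, 1))
--     e = n - 1
--     while e > 0:
--         if e & 1:
--             R = mat_mul(R, M)
--         M = mat_mul(M, M)
--         e >>= 1
--     if x == 1:
--         return R[0][0]
--     return R[1][0]
-- ===== Notes on version B (the rewrite author's own statement) =====
-- stated objective: faster
-- what changed: Replaces the linear dp sweep over all n columns by binary exponentiation of the 2x2 transfer matrix [[0,k-1],[1,k-2]] mod 1e9+7, reading the answer off the x-th row of M^(n-1).
import Mathlib
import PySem

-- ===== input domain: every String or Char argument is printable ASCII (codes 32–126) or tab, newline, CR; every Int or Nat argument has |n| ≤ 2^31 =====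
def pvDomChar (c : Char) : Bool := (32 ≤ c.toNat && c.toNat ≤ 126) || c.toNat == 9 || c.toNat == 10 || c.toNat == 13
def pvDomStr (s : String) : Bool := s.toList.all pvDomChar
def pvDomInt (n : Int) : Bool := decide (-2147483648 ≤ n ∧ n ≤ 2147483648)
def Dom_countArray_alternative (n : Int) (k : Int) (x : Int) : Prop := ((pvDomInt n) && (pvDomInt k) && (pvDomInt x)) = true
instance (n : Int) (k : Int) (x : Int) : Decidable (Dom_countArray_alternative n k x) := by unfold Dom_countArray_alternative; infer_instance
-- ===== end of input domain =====

-- B replaces A's linear dp sweep by binary exponentiation of the 2x2 transfer matrix mod 1e9+7 (O(log n) multiplications).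


-- ===== PORT A =====
-- A fills two dp rows column by column but only ever reads the previous column,
-- so the loop is ported as a fold carrying the current column (dp[0][i], dp[1][i]).
def countArray_alternative (n : Int) (k : Int) (x : Int) : Int :=
  let md : Int := 1000000007
  let dp0_0 : Int := if x = 1 then 1 else 0
  let dp1_0 : Int := if x = 1 then 0 else 1
  let dp := (PySem.List.pyRange 1 n 1).foldl
    (fun (st : Int × Int) _ =>
      (PySem.Int.mod st.2 md, PySem.Int.mod (st.1 * (k - 1) + st.2 * (k - 2)) md))
    (dp0_0, dp1_0)
  dp.1

-- ===== PORT B =====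
def pvMatMul (A B : (Int × Int) × (Int × Int)) : (Int × Int) × (Int × Int) :=
  let md : Int := 1000000007
  ((PySem.Int.mod (A.1.1 * B.1.1 + A.1.2 * B.2.1) md,
    PySem.Int.mod (A.1.1 * B.1.2 + A.1.2 * B.2.2) md),
   (PySem.Int.mod (A.2.1 * B.1.1 + A.2.2 * B.2.1) md,
    PySem.Int.mod (A.2.1 * B.1.2 + A.2.2 * B.2.2) md))

-- the `while e > 0` square-and-multiply loop of Source B (e halves each turn)
def pvMatPow (M R : (Int × Int) × (Int × Int)) (e : Nat) : (Int × Int) × (Int × Int) :=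
  if h : e = 0 then R
  else pvMatPow (pvMatMul M M) (if e % 2 = 1 then pvMatMul R M else R) (e / 2)
termination_by e
decreasing_by exact Nat.div_lt_self (Nat.pos_of_ne_zero h) (by norm_num)

def countArray_alternative_alt (n : Int) (k : Int) (x : Int) : Int :=
  let md : Int := 1000000007
  let M0 : (Int × Int) × (Int × Int) := ((0, PySem.Int.mod (k - 1) md), (1, PySem.Int.mod (k - 2) md))
  let R := pvMatPow M0 ((1, 0), (0, 1)) (n - 1).toNat
  if x = 1 then R.1.1 else R.2.1

-- ===== PRECONDITION & SPEC =====
-- A raises IndexError for n ≤ 0 (dp rows are empty); excluded.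
def Pre_countArray_alternative (n : Int) (k : Int) (x : Int) : Prop := 1 ≤ n
instance (n : Int) (k : Int) (x : Int) : Decidable (Pre_countArray_alternative n k x) := by unfold Pre_countArray_alternative; infer_instance
def pvWitness_countArray_alternative : Int × Int × Int := (4, 3, 2)

def Spec_countArray_alternative (n : Int) (k : Int) (x : Int) (out : Int) : Prop := out = countArray_alternative_alt n k x
instance (n : Int) (k : Int) (x : Int) (out : Int) : Decidable (Spec_countArray_alternative n k x out) := by unfold Spec_countArray_alternative; infer_instance

-- ===== CLAIM (what is proved, stated in full; the proofs are below) =====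
def Claim_equal_countArray_alternative : Prop := ∀ (n : Int) (k : Int) (x : Int), Dom_countArray_alternative n k x → Pre_countArray_alternative n k x → Spec_countArray_alternative n k x (countArray_alternative n k x)

-- ===== LEMMAS AND PROOFS =====

-- the prime modulus, as a Nat, and casting into ZMod of it
def pvN : Nat := 1000000007

def pvInR (z : Int) : Prop := 0 ≤ z ∧ z < 1000000007

lemma pvInR_mod (a : Int) : pvInR (PySem.Int.mod a 1000000007) := by
  rw [PySem.Int.mod_eq_emod_of_pos (by norm_num)]
  exact ⟨Int.emod_nonneg a (by norm_num), Int.emod_lt_of_pos a (by norm_num)⟩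

lemma pvCast_mod (a : Int) :
    ((PySem.Int.mod a 1000000007 : Int) : ZMod pvN) = (a : ZMod pvN) := by
  rw [PySem.Int.mod_eq_emod_of_pos (by norm_num)]
  have : ((1000000007 : Int)) = ((pvN : Nat) : Int) := by norm_num [pvN]
  rw [this, ZMod.intCast_mod]

lemma pvCast_emod (a : Int) : ((a % 1000000007 : Int) : ZMod pvN) = (a : ZMod pvN) := by
  have h : ((1000000007 : Int)) = ((pvN : Nat) : Int) := by norm_num [pvN]
  rw [h, ZMod.intCast_mod]

lemma pvInj {a b : Int} (ha : pvInR a) (hb : pvInR b)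
    (h : (a : ZMod pvN) = (b : ZMod pvN)) : a = b := by
  rw [ZMod.intCast_eq_intCast_iff] at h
  have h2 : a % (pvN : Int) = b % (pvN : Int) := h
  have hn : (pvN : Int) = 1000000007 := by norm_num [pvN]
  rw [hn] at h2
  rw [Int.emod_eq_of_lt ha.1 ha.2, Int.emod_eq_of_lt hb.1 hb.2] at h2
  exact h2

-- bridge to Mathlib 2x2 matrices over ZMod pvN
def pvMt (A : (Int × Int) × (Int × Int)) : Matrix (Fin 2) (Fin 2) (ZMod pvN) :=
  !![(A.1.1 : ZMod pvN), (A.1.2 : ZMod pvN); (A.2.1 : ZMod pvN), (A.2.2 : ZMod pvN)]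

lemma pvMt_mul (A B : (Int × Int) × (Int × Int)) :
    pvMt (pvMatMul A B) = pvMt A * pvMt B := by
  ext i j
  fin_cases i <;> fin_cases j <;>
    simp [pvMatMul, pvMt, Matrix.mul_apply, Fin.sum_univ_two, pvCast_mod, pvCast_emod] <;>
    push_cast <;> ring

def pvInRM (A : (Int × Int) × (Int × Int)) : Prop :=
  pvInR A.1.1 ∧ pvInR A.1.2 ∧ pvInR A.2.1 ∧ pvInR A.2.2

lemma pvInRM_mul (A B : (Int × Int) × (Int × Int)) : pvInRM (pvMatMul A B) :=
  ⟨pvInR_mod _, pvInR_mod _, pvInR_mod _, pvInR_mod _⟩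

lemma pvMatPow_cast (e : Nat) : ∀ M R, pvMt (pvMatPow M R e) = pvMt R * (pvMt M) ^ e := by
  induction e using Nat.strong_induction_on with
  | _ e ih =>
    intro M R
    rw [pvMatPow]
    by_cases h0 : e = 0
    · simp [h0]
    · simp only [h0, dif_neg, not_false_iff]
      rw [ih (e / 2) (Nat.div_lt_self (Nat.pos_of_ne_zero h0) (by norm_num))]
      rw [pvMt_mul]
      by_cases hp : e % 2 = 1
      · rw [if_pos hp, pvMt_mul, ← sq, ← pow_mul, mul_assoc, ← pow_succ']
        have he : e = 2 * (e / 2) + 1 := by omega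
        conv_rhs => rw [he]
      · rw [if_neg hp, ← sq, ← pow_mul]
        have he : e = 2 * (e / 2) := by omega
        conv_rhs => rw [he]

lemma pvMatPow_inR (e : Nat) : ∀ M R, pvInRM R → pvInRM (pvMatPow M R e) := by
  induction e using Nat.strong_induction_on with
  | _ e ih =>
    intro M R hR
    rw [pvMatPow]
    by_cases h0 : e = 0
    · simpa [h0] using hR
    · simp only [h0, dif_neg, not_false_iff]
      refine ih (e / 2) (Nat.div_lt_self (Nat.pos_of_ne_zero h0) (by norm_num)) _ _ ?_
      by_cases hp : e % 2 = 1
      · rw [if_pos hp]; exact pvInRM_mul _ _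
      · rw [if_neg hp]; exact hR

-- the transfer matrix of the recurrence, over ZMod pvN
def pvMk (k : Int) : Matrix (Fin 2) (Fin 2) (ZMod pvN) :=
  !![0, (k : ZMod pvN) - 1; 1, (k : ZMod pvN) - 2]

-- A's loop body
def pvStep (k : Int) (st : Int × Int) : Int × Int :=
  (PySem.Int.mod st.2 1000000007,
   PySem.Int.mod (st.1 * (k - 1) + st.2 * (k - 2)) 1000000007)

lemma pvFold_iterate (k : Int) (l : List Int) (s : Int × Int) :
    l.foldl (fun (st : Int × Int) _ =>
      (PySem.Int.mod st.2 1000000007,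
       PySem.Int.mod (st.1 * (k - 1) + st.2 * (k - 2)) 1000000007)) s
      = (pvStep k)^[l.length] s := by
  induction l generalizing s with
  | nil => rfl
  | cons a t ih =>
      simp only [List.foldl_cons, List.length_cons, ih, Function.iterate_succ_apply]
      rfl

-- the dp pair tracks the row vector e_i * Mk^m
lemma pvIterate_cast (k : Int) (m : Nat) (s : Int × Int) :
    (((pvStep k)^[m] s).1 : ZMod pvN)
        = (s.1 : ZMod pvN) * (pvMk k ^ m) 0 0 + (s.2 : ZMod pvN) * (pvMk k ^ m) 1 0
    ∧ (((pvStep k)^[m] s).2 : ZMod pvN)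
        = (s.1 : ZMod pvN) * (pvMk k ^ m) 0 1 + (s.2 : ZMod pvN) * (pvMk k ^ m) 1 1 := by
  induction m with
  | zero => simp
  | succ m ih =>
      rw [Function.iterate_succ_apply']
      have h00 : (pvMk k ^ (m+1)) 0 0 = (pvMk k ^ m) 0 1 := by
        rw [pow_succ, Matrix.mul_apply, Fin.sum_univ_two]; simp [pvMk]
      have h10 : (pvMk k ^ (m+1)) 1 0 = (pvMk k ^ m) 1 1 := by
        rw [pow_succ, Matrix.mul_apply, Fin.sum_univ_two]; simp [pvMk]
      have h01 : (pvMk k ^ (m+1)) 0 1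
          = (pvMk k ^ m) 0 0 * ((k : ZMod pvN) - 1) + (pvMk k ^ m) 0 1 * ((k : ZMod pvN) - 2) := by
        rw [pow_succ, Matrix.mul_apply, Fin.sum_univ_two]; simp [pvMk]
      have h11 : (pvMk k ^ (m+1)) 1 1
          = (pvMk k ^ m) 1 0 * ((k : ZMod pvN) - 1) + (pvMk k ^ m) 1 1 * ((k : ZMod pvN) - 2) := by
        rw [pow_succ, Matrix.mul_apply, Fin.sum_univ_two]; simp [pvMk]
      constructor
      · rw [h00, h10]
        show ((PySem.Int.mod ((pvStep k)^[m] s).2 1000000007 : Int) : ZMod pvN) = _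
        rw [pvCast_mod, ih.2]
      · rw [h01, h11]
        show ((PySem.Int.mod (((pvStep k)^[m] s).1 * (k - 1) + ((pvStep k)^[m] s).2 * (k - 2))
                1000000007 : Int) : ZMod pvN) = _
        rw [pvCast_mod]
        push_cast
        rw [ih.1, ih.2]
        ring

lemma pvIterate_inR (k : Int) (m : Nat) (s : Int × Int) (hs : pvInR s.1) :
    pvInR (((pvStep k)^[m] s).1) := by
  cases m with
  | zero => simpa using hs
  | succ m =>
      rw [Function.iterate_succ_apply']
      exact pvInR_mod _

lemma pvMt_M0 (k : Int) :
    pvMt ((0, PySem.Int.mod (k - 1) 1000000007), (1, PySem.Int.mod (k - 2) 1000000007))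
      = pvMk k := by
  ext i j
  fin_cases i <;> fin_cases j <;>
    simp [pvMt, pvMk, pvCast_emod] <;> push_cast <;> ring

lemma pvMt_apply00 (A : (Int × Int) × (Int × Int)) : pvMt A 0 0 = ((A.1.1 : Int) : ZMod pvN) := by
  simp [pvMt]

lemma pvMt_apply10 (A : (Int × Int) × (Int × Int)) : pvMt A 1 0 = ((A.2.1 : Int) : ZMod pvN) := by
  simp [pvMt]

-- ===== VERDICT (by name: the statement is the Claim_ definition above) =====
theorem countArray_alternative_spec : Claim_equal_countArray_alternative := by
  intro n k x _ _
  unfold Spec_countArray_alternative countArray_alternative countArray_alternative_alt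
  simp only [pvFold_iterate, PySem.List.length_pyRange_one]
  -- B's result and its characterisation mod pvN
  have hBcast := pvMatPow_cast ((n - 1).toNat)
      ((0, PySem.Int.mod (k - 1) 1000000007), (1, PySem.Int.mod (k - 2) 1000000007)) ((1,0),(0,1))
  rw [pvMt_M0] at hBcast
  have hI : pvMt (((1:Int),(0:Int)),((0:Int),(1:Int))) = 1 := by
    simp [pvMt, Matrix.one_fin_two]
  rw [hI, one_mul] at hBcast
  have hRBin : pvInRM (pvMatPow ((0, PySem.Int.mod (k - 1) 1000000007),
      (1, PySem.Int.mod (k - 2) 1000000007)) ((1,0),(0,1)) ((n - 1).toNat)) :=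
    pvMatPow_inR _ _ _
      ⟨⟨by norm_num, by norm_num⟩, ⟨by norm_num, by norm_num⟩,
       ⟨by norm_num, by norm_num⟩, ⟨by norm_num, by norm_num⟩⟩
  have hB00 : (((pvMatPow ((0, PySem.Int.mod (k - 1) 1000000007), (1, PySem.Int.mod (k - 2) 1000000007)) ((1,0),(0,1)) ((n - 1).toNat)).1.1 : Int) : ZMod pvN) = (pvMk k ^ (n - 1).toNat) 0 0 := by
    rw [← pvMt_apply00, hBcast]
  have hB10 : (((pvMatPow ((0, PySem.Int.mod (k - 1) 1000000007), (1, PySem.Int.mod (k - 2) 1000000007)) ((1,0),(0,1)) ((n - 1).toNat)).2.1 : Int) : ZMod pvN) = (pvMk k ^ (n - 1).toNat) 1 0 := by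
    rw [← pvMt_apply10, hBcast]
  by_cases hx : x = 1
  · simp only [hx, ite_true]
    refine pvInj (pvIterate_inR k _ _ (by norm_num [pvInR])) hRBin.1 ?_
    rw [(pvIterate_cast k ((n - 1).toNat) (1,0)).1, hB00]
    push_cast
    ring
  · simp only [hx, ite_false]
    refine pvInj (pvIterate_inR k _ _ (by norm_num [pvInR])) hRBin.2.2.1 ?_
    rw [(pvIterate_cast k ((n - 1).toNat) (0,1)).1, hB10]
    push_cast
    ring
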